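-- pv_equiv track=rewrite | github.com/Adnan525/challenges_v2 | lottery/lottery.py | lottery
-- ===== SOURCE A (Python) =====
-- def lottery(s: str) -> str:
--     output = ""
--     for char in s:
--         if char.isdigit():
--             output+= "" if char in output else char
--
--     if not output:
--         return "One more run!"
--     return output
-- ===== SOURCE B (Python) =====
-- def lottery(s: str) -> str:
--     present = [d for d in "0123456789" if d in s]
--     winners = "".join(sorted(present, key=s.index))
--     return winners if winners else "One more run!"
-- ===== Notes on version B (the rewrite author's own statement) =====
-- stated objective: alternative
-- what changed: Instead of scanning s while growing an output string with a per-character membership branch, B iterates over the ten decimal digit symbols, keeps those present in s, and sorts them by s.index (first-occurrence position) to recover appearance order.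
import Mathlib
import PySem

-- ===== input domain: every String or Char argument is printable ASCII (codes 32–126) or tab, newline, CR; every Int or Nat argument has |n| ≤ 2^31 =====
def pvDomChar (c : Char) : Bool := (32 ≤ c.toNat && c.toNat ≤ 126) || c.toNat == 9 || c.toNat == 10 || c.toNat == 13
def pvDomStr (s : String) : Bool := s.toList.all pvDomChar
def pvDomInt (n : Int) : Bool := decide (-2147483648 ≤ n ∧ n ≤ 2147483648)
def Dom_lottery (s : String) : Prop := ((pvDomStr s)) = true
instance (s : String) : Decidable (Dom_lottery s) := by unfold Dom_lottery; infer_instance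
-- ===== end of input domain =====

-- B enumerates the ten decimal digit symbols, keeps those occurring in s, and sorts them
-- by first-occurrence position (s.index) — a different algorithm from A's scan of s with
-- a growing output string and a membership branch; same return values.

-- ===== PORT A =====
def lottery (s : String) : String :=
  let output := s.toList.foldl
    (fun output char =>
      if PySem.Chars.isdigit char then
        output ++ (if output.contains char then [] else [char])
      else output) []
  if output = [] then "One more run!" else String.mk output

-- ===== PORT B =====
-- s.index d: for d ∈ s (guaranteed by the 'if d in s' filter) Python returns the first
-- occurrence index; ported as (index? …).getD 0, exact on exactly those inputs.
def lottery_alt (s : String) : String :=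
  let present := "0123456789".toList.filter (fun d => s.toList.contains d)
  let winners := PySem.List.sorted present (fun d => (PySem.List.index? s.toList d).getD 0) false
  if winners = [] then "One more run!" else String.mk winners

-- ===== PRECONDITION & SPEC =====
def Spec_lottery (s : String) (out : String) : Prop := out = lottery_alt s
instance (s : String) (out : String) : Decidable (Spec_lottery s out) := by unfold Spec_lottery; infer_instance

-- ===== CLAIM (what is proved, stated in full; the proofs are below) =====
def Claim_equal_lottery : Prop := ∀ (s : String), Dom_lottery s → Spec_lottery s (lottery s)

-- ===== LEMMAS AND PROOFS =====

-- A's accumulator step is exactly PySem.Set.add.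
theorem lottery_step_eq_add (acc : List Char) (c : Char) :
    acc ++ (if acc.contains c then [] else [c]) = PySem.Set.add acc c := by
  simp only [PySem.Set.add, PySem.Set.contains_eq_listContains]
  split <;> simp

-- A's fold is the ordered dedup of the digit characters of s.
theorem lottery_fold_eq_dedup (s : String) :
    s.toList.foldl
      (fun output char =>
        if PySem.Chars.isdigit char then
          output ++ (if output.contains char then [] else [char])
        else output) [] =
    PySem.List.dedup (s.toList.filter PySem.Chars.isdigit) := by
  rw [PySem.List.foldl_if_eq_foldl_filter]
  rw [PySem.List.dedup_eq_ofList, PySem.Set.ofList_eq_foldl]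
  exact PySem.List.foldl_congr_mem _ _ _ _ (fun acc x _ => lottery_step_eq_add acc x)

theorem digits_toList : "0123456789".toList = ['0','1','2','3','4','5','6','7','8','9'] := by
  decide

theorem char_eq_iff_toNat (c d : Char) : c = d ↔ c.toNat = d.toNat := by
  constructor
  · rintro rfl; rfl
  · intro h; exact Char.ext (UInt32.toNat_inj.mp h)

-- Python's isdigit is exactly membership in "0123456789" (Char '≤' is codepoint order).
theorem isdigit_iff_mem (c : Char) :
    PySem.Chars.isdigit c = true ↔ c ∈ "0123456789".toList := by
  rw [digits_toList]
  simp only [PySem.Chars.isdigit, Bool.and_eq_true, decide_eq_true_eq,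
    Char.le_def, UInt32.le_iff_toNat_le, List.mem_cons, List.not_mem_nil, or_false]
  show (48 ≤ c.toNat ∧ c.toNat ≤ 57) ↔ _
  constructor
  · rintro ⟨h1, h2⟩
    interval_cases h : c.toNat <;> simp [char_eq_iff_toNat, h]
  · rintro (rfl|rfl|rfl|rfl|rfl|rfl|rfl|rfl|rfl|rfl) <;> exact ⟨by decide, by decide⟩

theorem dedup_append_singleton (l : List Char) (c : Char) :
    PySem.List.dedup (l ++ [c]) =
      (if c ∈ PySem.List.dedup l then PySem.List.dedup l
       else PySem.List.dedup l ++ [c]) := by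
  simp [PySem.List.dedup, PySem.Set.ofList, List.foldl_append, PySem.Set.add]

-- first-occurrence dedup commutes with filter
theorem dedup_filter_comm (l : List Char) (p : Char → Bool) :
    PySem.List.dedup (l.filter p) = (PySem.List.dedup l).filter p := by
  induction l using List.reverseRecOn with
  | nil => rfl
  | append_singleton l c ih =>
    rw [List.filter_append, dedup_append_singleton]
    cases hp : p c
    · have h0 : List.filter p [c] = [] := by simp [hp]
      rw [h0, List.append_nil, ih]
      split
      · rfl
      · simp [List.filter_append, hp]
    · have h0 : List.filter p [c] = [c] := by simp [hp]
      rw [h0, dedup_append_singleton, ih]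
      by_cases hc : c ∈ l
      · simp [List.mem_filter, hc, hp]
      · simp [List.mem_filter, hc, hp, List.filter_append]

-- the ordered dedup is strictly increasing in first-occurrence index
theorem dedup_pairwise_index (l : List Char) :
    (PySem.List.dedup l).Pairwise
      (fun a b => (PySem.List.index? l a).getD 0 < (PySem.List.index? l b).getD 0) := by
  induction l using List.reverseRecOn with
  | nil => exact List.Pairwise.nil
  | append_singleton l c ih =>
    rw [dedup_append_singleton]
    have hmem : ∀ a ∈ PySem.List.dedup l, a ∈ l :=
      fun a ha => (PySem.List.mem_dedup l a).mp ha
    have hkey : ∀ a ∈ PySem.List.dedup l,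
        PySem.List.index? (l ++ [c]) a = PySem.List.index? l a :=
      fun a ha => PySem.List.index?_append_of_mem [c] (hmem a ha)
    have ih' : (PySem.List.dedup l).Pairwise
        (fun a b => (PySem.List.index? (l ++ [c]) a).getD 0 <
          (PySem.List.index? (l ++ [c]) b).getD 0) :=
      ih.imp_of_mem (fun ha hb hr => by rw [hkey _ ha, hkey _ hb]; exact hr)
    by_cases hc : c ∈ PySem.List.dedup l
    · rw [if_pos hc]; exact ih'
    · rw [if_neg hc]
      have hcl : c ∉ l := fun h => hc ((PySem.List.mem_dedup l c).mpr h)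
      rw [List.pairwise_append]
      refine ⟨ih', List.pairwise_singleton _ _, ?_⟩
      intro a ha b hb
      rw [List.mem_singleton] at hb
      rw [hb]
      rw [hkey a ha, PySem.List.index?_append_singleton_self l c hcl]
      have hamem := hmem a ha
      have hsome : (PySem.List.index? l a).isSome = true :=
        (PySem.List.index?_isSome_iff l a).mpr hamem
      obtain ⟨k, hk⟩ := Option.isSome_iff_exists.mp hsome
      obtain ⟨hklt, -⟩ := PySem.List.getElem_of_index?_eq_some hk
      rw [hk]
      simpa using hklt

-- B's sort names A's dedup list: it is a rearrangement of the present digits that is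
-- strictly increasing in the sort key (first-occurrence index).
theorem sorted_present_eq_dedup (s : String) :
    PySem.List.sorted ("0123456789".toList.filter (fun d => s.toList.contains d))
      (fun d => (PySem.List.index? s.toList d).getD 0) false =
    PySem.List.dedup (s.toList.filter PySem.Chars.isdigit) := by
  apply PySem.List.sorted_eq_of_perm_of_pairwise_lt
  · apply (List.perm_ext_iff_of_nodup (PySem.List.nodup_dedup _)
      ((by decide : ("0123456789".toList).Nodup).filter _)).mpr
    intro a
    rw [PySem.List.mem_dedup, List.mem_filter, List.mem_filter]
    constructor
    · rintro ⟨ha, hd⟩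
      exact ⟨(isdigit_iff_mem a).mp hd, by simpa using ha⟩
    · rintro ⟨hd, ha⟩
      exact ⟨by simpa using ha, (isdigit_iff_mem a).mpr hd⟩
  · rw [dedup_filter_comm]
    exact List.Pairwise.sublist List.filter_sublist (dedup_pairwise_index s.toList)

-- ===== VERDICT (by name: the statement is the Claim_ definition above) =====
theorem lottery_spec : Claim_equal_lottery := by
  intro s _
  unfold Spec_lottery lottery lottery_alt
  simp only [lottery_fold_eq_dedup, sorted_present_eq_dedup]
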